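-- pv_equiv track=rewrite | github.com/FewIT20/labs-pscp65 | Week14/Bowling-Reddit.py | last_frame
-- ===== SOURCE A (Python) =====
-- def last_frame(pin):
--     """return score last frame"""
--     score, score1 = 0, 0
--     for i in pin:
--         if i == "X":
--             score += 10
--         elif i == "/":
--             score += 10
--             score1 = 0
--         else:
--             score1 += int(i) if i != "-" else 0
--     return score + score1
-- ===== SOURCE B (Python) =====
-- def last_frame(pin):
--     """return score last frame"""
--     score = 10 * sum(c in ("X", "/") for c in pin)
--     tail = 0
--     for c in reversed(pin):
--         if c == "/":
--             break
--         if c != "X" and c != "-":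
--             tail += int(c)
--     return score + tail
-- ===== Notes on version B (the rewrite author's own statement) =====
-- stated objective: simpler
-- what changed: Replaces the two-accumulator forward loop (with score1 reset on each '/') by a closed count of 'X'/'/' marks times 10 plus one reverse scan that sums digit throws and stops at the first '/', exploiting that only digits after the last '/' survive the resets.
import Mathlib
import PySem

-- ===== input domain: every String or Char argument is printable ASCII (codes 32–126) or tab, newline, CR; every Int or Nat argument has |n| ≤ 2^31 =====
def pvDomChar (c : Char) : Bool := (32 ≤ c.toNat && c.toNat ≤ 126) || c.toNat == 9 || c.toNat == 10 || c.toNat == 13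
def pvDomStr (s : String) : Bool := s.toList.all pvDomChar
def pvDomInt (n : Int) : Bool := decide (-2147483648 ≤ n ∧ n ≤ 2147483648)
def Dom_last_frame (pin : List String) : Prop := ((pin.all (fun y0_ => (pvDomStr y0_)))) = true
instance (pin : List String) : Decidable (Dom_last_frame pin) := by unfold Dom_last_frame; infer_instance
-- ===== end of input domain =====

-- B replaces A's two-accumulator forward loop by 10 * count of marks plus one
-- reverse scan summing digits until the first '/' (simpler decomposition).
-- Return-value equivalence only; A raises ValueError on malformed throws (excluded by Pre_).

-- ===== PORT A =====
-- A's loop body over state (score, score1)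
def lfStep (st : Int × Int) (i : String) : Int × Int :=
  if i = "X" then (st.1 + 10, st.2)
  else if i = "/" then (st.1 + 10, 0)
  else (st.1, st.2 + (if i ≠ "-" then (PySem.Int.ofStr? i).getD 0 else 0))

def last_frame (pin : List String) : Int :=
  let st := pin.foldl lfStep (0, 0)
  st.1 + st.2

-- ===== PORT B =====
-- B's reverse scan with break at the first '/'
def lfTailSum : List String → Int
  | [] => 0
  | c :: r => if c = "/" then 0
              else (if c ≠ "X" ∧ c ≠ "-" then (PySem.Int.ofStr? c).getD 0 else 0) + lfTailSum r

def last_frame_alt (pin : List String) : Int :=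
  10 * (pin.countP (fun c => c == "X" || c == "/")) + lfTailSum pin.reverse

-- ===== PRECONDITION & SPEC =====
def lfValid (s : String) : Bool :=
  s == "X" || s == "/" || s == "-" || (PySem.Int.ofStr? s).isSome

-- Pre_ excludes exactly the inputs where Python A raises ValueError (int() on a
-- throw string that is not "X", "/", "-" and not int-parseable).
def Pre_last_frame (pin : List String) : Prop := ∀ s ∈ pin, lfValid s = true
instance (pin : List String) : Decidable (Pre_last_frame pin) := by unfold Pre_last_frame; infer_instance

def pvWitness_last_frame : List String := ["X", "3", "/", " 4 ", "-"]

def Spec_last_frame (pin : List String) (out : Int) : Prop := out = last_frame_alt pin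
instance (pin : List String) (out : Int) : Decidable (Spec_last_frame pin out) := by unfold Spec_last_frame; infer_instance

-- ===== CLAIM (what is proved, stated in full; the proofs are below) =====
def Claim_equal_last_frame : Prop := ∀ (pin : List String), Dom_last_frame pin → Pre_last_frame pin → Spec_last_frame pin (last_frame pin)

-- ===== LEMMAS AND PROOFS =====

-- loop invariant: A's fold computes exactly B's two quantities
theorem lfFold_eq (l : List String) :
    l.foldl lfStep (0, 0) =
      ((10 * (l.countP (fun c => c == "X" || c == "/")) : Int), lfTailSum l.reverse) := by
  induction l using List.reverseRecOn with
  | nil => simp [lfTailSum]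
  | append_singleton l i ih =>
      simp [List.foldl_append, ih, lfStep, List.countP_append, List.countP_cons]
      by_cases hx : i = "X"
      · simp [hx, lfTailSum]; ring
      · by_cases hs : i = "/"
        · simp [hs, lfTailSum]; ring
        · simp [hx, hs, lfTailSum]; ring

-- ===== VERDICT (by name: the statement is the Claim_ definition above) =====
theorem last_frame_spec : Claim_equal_last_frame := by
  intro pin _ _
  unfold Spec_last_frame last_frame last_frame_alt
  rw [lfFold_eq]
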